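-- pv_equiv track=rewrite | github.com/pypi-data/pypi-mirror-342 | packages/s3pact/s3pact-0.1.3.tar.gz/s3pact-0.1.3/s3pact/s3pact.py | reverse_versions
-- ===== SOURCE A (Python) =====
-- def reverse_versions(objs):
--     resp = []
--     list_versions = []
--     s3_key_before = None
--     for o in objs:
--         s3_key = o.get("Key")
--         if s3_key_before != s3_key and list_versions:
--             list_versions.reverse()
--             resp.extend(list_versions)
--             list_versions.clear()
--         list_versions.append(o)
--         s3_key_before = s3_key
--
--     # need to invert
--     list_versions.reverse()
--
--     # and append the last obj versions or i will miss it
--     return resp + list_versions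
-- ===== SOURCE B (Python) =====
-- def reverse_versions(objs):
--     resp = []
--     i = 0
--     n = len(objs)
--     while i < n:
--         # find the end of the run of consecutive objects sharing this Key
--         k = objs[i].get("Key")
--         j = i + 1
--         while j < n and objs[j].get("Key") == k:
--             j += 1
--         resp.extend(reversed(objs[i:j]))
--         i = j
--     return resp
-- ===== Notes on version B (the rewrite author's own statement) =====
-- stated objective: idiomatic
-- what changed: B scans the list run by run (finding the end of each consecutive same-Key run and extending with the reversed slice) instead of A's buffer-and-flush fold with s3_key_before state.
import Mathlib
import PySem

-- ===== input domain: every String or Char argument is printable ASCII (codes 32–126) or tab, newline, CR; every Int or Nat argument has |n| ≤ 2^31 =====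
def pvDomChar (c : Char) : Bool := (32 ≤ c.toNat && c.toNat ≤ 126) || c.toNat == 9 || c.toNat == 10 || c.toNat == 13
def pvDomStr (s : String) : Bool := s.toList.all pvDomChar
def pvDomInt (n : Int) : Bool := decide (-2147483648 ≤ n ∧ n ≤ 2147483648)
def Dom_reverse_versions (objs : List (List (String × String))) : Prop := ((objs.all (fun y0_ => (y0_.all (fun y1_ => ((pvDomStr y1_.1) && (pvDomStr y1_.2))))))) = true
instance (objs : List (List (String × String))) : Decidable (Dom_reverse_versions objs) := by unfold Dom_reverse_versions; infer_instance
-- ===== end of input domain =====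

-- B: run-splitting scan over consecutive same-Key runs, reversing each run in place of A's buffer-and-flush fold (objective: simpler).
-- ===== PORT A =====
-- o.get("Key") on the dict (association list, first match wins)
def rvKey (o : List (String × String)) : Option String :=
  (PySem.Dict.mk o).get? "Key"

-- one step of A's for-loop: state = (resp, list_versions, s3_key_before)
def rvStepA (st : List (List (String × String)) × List (List (String × String)) × Option String)
    (o : List (String × String)) :
    List (List (String × String)) × List (List (String × String)) × Option String :=
  let s3_key := rvKey o
  let (resp, list_versions, s3_key_before) := st
  if s3_key_before ≠ s3_key ∧ list_versions ≠ [] then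
    (resp ++ list_versions.reverse, [o], s3_key)
  else
    (resp, list_versions ++ [o], s3_key)

def reverse_versions (objs : List (List (String × String))) : List (List (String × String)) :=
  let (resp, list_versions, _) := objs.foldl rvStepA ([], [], none)
  resp ++ list_versions.reverse

-- ===== PORT B =====
-- split off the leading run whose objects all have Key = k
def rvRun (k : Option String) : List (List (String × String)) →
    List (List (String × String)) × List (List (String × String))
  | [] => ([], [])
  | o :: rest =>
    if rvKey o = k then
      let (g, r) := rvRun k rest
      (o :: g, r)
    else
      ([], o :: rest)

theorem rvRun_snd_le (k : Option String) (xs : List (List (String × String))) :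
    (rvRun k xs).2.length ≤ xs.length := by
  induction xs with
  | nil => simp [rvRun]
  | cons o rest ih =>
    simp only [rvRun]
    split
    · simpa using Nat.le_succ_of_le ih
    · simp

def reverse_versions_alt (objs : List (List (String × String))) : List (List (String × String)) :=
  match objs with
  | [] => []
  | o :: rest =>
    (o :: (rvRun (rvKey o) rest).1).reverse ++ reverse_versions_alt (rvRun (rvKey o) rest).2
termination_by objs.length
decreasing_by
  simpa using Nat.lt_succ_of_le (rvRun_snd_le (rvKey o) rest)
-- ===== PRECONDITION & SPEC =====
def Spec_reverse_versions (objs : List (List (String × String))) (out : List (List (String × String))) : Prop := out = reverse_versions_alt objs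
instance (objs : List (List (String × String))) (out : List (List (String × String))) : Decidable (Spec_reverse_versions objs out) := by unfold Spec_reverse_versions; infer_instance

-- ===== CLAIM (what is proved, stated in full; the proofs are below) =====
def Claim_equal_reverse_versions : Prop := ∀ (objs : List (List (String × String))), Dom_reverse_versions objs → Spec_reverse_versions objs (reverse_versions objs)

-- ===== LEMMAS AND PROOFS =====

-- the value A returns from a final fold state
def rvFinish (st : List (List (String × String)) × List (List (String × String)) × Option String) :
    List (List (String × String)) :=
  st.1 ++ st.2.1.reverse

-- loop invariant: with a nonempty buffer lv whose run key is kb, A's remaining fold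
-- emits the completed run (lv ++ leading run of xs) reversed, then B's value on the rest
theorem rvFold_eq (xs : List (List (String × String))) :
    ∀ (resp lv : List (List (String × String))) (kb : Option String), lv ≠ [] →
    rvFinish (xs.foldl rvStepA (resp, lv, kb)) =
      resp ++ (lv ++ (rvRun kb xs).1).reverse ++ reverse_versions_alt (rvRun kb xs).2 := by
  induction xs with
  | nil =>
    intro resp lv kb _
    simp [rvRun, rvFinish, reverse_versions_alt.eq_def]
  | cons o rest ih =>
    intro resp lv kb hlv
    by_cases hk : rvKey o = kb
    · have hstep : rvStepA (resp, lv, kb) o = (resp, lv ++ [o], kb) := by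
        simp [rvStepA, hk]
      rw [List.foldl_cons, hstep, ih resp (lv ++ [o]) kb (by simp)]
      simp [rvRun, hk]
    · have hk' : kb ≠ rvKey o := fun h => hk h.symm
      have hstep : rvStepA (resp, lv, kb) o = (resp ++ lv.reverse, [o], rvKey o) := by
        simp [rvStepA, hk', hlv]
      rw [List.foldl_cons, hstep, ih (resp ++ lv.reverse) [o] (rvKey o) (by simp)]
      conv_rhs => rw [reverse_versions_alt.eq_def]
      simp [rvRun, hk]

-- ===== VERDICT (by name: the statement is the Claim_ definition above) =====
theorem reverse_versions_spec : Claim_equal_reverse_versions := by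
  unfold Claim_equal_reverse_versions
  intro objs _
  show reverse_versions objs = reverse_versions_alt objs
  cases objs with
  | nil => simp [reverse_versions, reverse_versions_alt.eq_def]
  | cons o rest =>
    have h0 : rvStepA ([], [], none) o = ([], [o], rvKey o) := by
      simp [rvStepA]
    have : reverse_versions (o :: rest) = rvFinish ((o :: rest).foldl rvStepA ([], [], none)) := by
      simp [reverse_versions, rvFinish]
    rw [this, List.foldl_cons, h0, rvFold_eq rest [] [o] (rvKey o) (by simp)]
    conv_rhs => rw [reverse_versions_alt.eq_def]
    simp
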